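-- pv_equiv track=rewrite | github.com/saaim12/DSA-Python | Recursions and Backtracking/Subsequences/Subsequences.py | sub_sequences_equals_k
-- ===== SOURCE A (Python) =====
-- def sub_sequences_equals_k(idx,arr,path,res,target,sum):
--     if sum==target:
--         res.append(list(path))
--         return res
--     if idx>=len(arr):
--         return res
--     path.append(arr[idx])
--     sum+=arr[idx]
--     sub_sequences_equals_k(idx+1,arr,path,res,target,sum)
--     path.pop()
--     sum-=arr[idx]
--     sub_sequences_equals_k(idx+1,arr,path,res,target,sum)
--     return res
-- ===== SOURCE B (Python) =====
-- def sub_sequences_equals_k(idx, arr, path, res, target, sum):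
--     # Explicit LIFO stack DFS instead of recursion; same res mutation/return.
--     stack = [(idx, sum, list(path))]
--     while stack:
--         i, s, p = stack.pop()
--         if s == target:
--             res.append(p)
--             continue
--         if i >= len(arr):
--             continue
--         stack.append((i + 1, s, p))                      # skip branch (processed second)
--         stack.append((i + 1, s + arr[i], p + [arr[i]]))  # take branch (processed first)
--     return res
-- ===== Notes on version B (the rewrite author's own statement) =====
-- stated objective: alternative
-- what changed: Replaces the two-call backtracking recursion with an iterative DFS over an explicit LIFO stack of (index, running-sum, path) frames, pushing the skip frame before the take frame to keep A's output order.
import Mathlib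
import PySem

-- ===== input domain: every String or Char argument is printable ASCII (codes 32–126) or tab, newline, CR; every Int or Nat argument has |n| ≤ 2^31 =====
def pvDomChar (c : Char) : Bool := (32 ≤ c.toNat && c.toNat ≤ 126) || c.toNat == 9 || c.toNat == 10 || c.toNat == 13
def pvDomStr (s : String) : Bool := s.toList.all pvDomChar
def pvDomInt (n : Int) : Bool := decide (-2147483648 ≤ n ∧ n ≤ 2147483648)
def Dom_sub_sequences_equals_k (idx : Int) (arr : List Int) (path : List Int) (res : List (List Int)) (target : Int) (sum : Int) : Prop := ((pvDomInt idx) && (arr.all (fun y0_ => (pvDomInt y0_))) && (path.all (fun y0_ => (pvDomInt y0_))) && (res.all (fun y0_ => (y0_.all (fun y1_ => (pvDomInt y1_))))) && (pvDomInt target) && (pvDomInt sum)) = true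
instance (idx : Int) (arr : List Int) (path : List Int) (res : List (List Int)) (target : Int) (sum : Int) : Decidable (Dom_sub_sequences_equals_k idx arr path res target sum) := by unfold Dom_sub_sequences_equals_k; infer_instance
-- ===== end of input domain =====

-- B replaces the two-call backtracking recursion by an iterative DFS over an explicit
-- LIFO stack of (index, running-sum, path) frames (alternative decomposition, same cost).
-- Both Pythons mutate/return the same res object; the equivalence proved is about the return value.

-- ===== PORT A =====
-- Literal port of A's recursion; the `none` arm of pyGet? is where Python raises
-- IndexError (excluded by Pre_), the port returns res there.
def sub_sequences_equals_k (idx : Int) (arr : List Int) (path : List Int) (res : List (List Int)) (target : Int) (sum : Int) : List (List Int) :=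
  if sum = target then res ++ [path]
  else if (arr.length : Int) ≤ idx then res
  else
    match PySem.List.pyGet? arr idx with
    | none => res
    | some a =>
      let res1 := sub_sequences_equals_k (idx + 1) arr (path ++ [a]) res target (sum + a)
      sub_sequences_equals_k (idx + 1) arr path res1 target sum
termination_by ((arr.length : Int) - idx).toNat
decreasing_by all_goals omega

-- ===== PORT B =====
-- Measure used only for termination of the stack loop.
def pvStackMeasure (arr : List Int) (stack : List (Int × Int × List Int)) : Nat :=
  (stack.map (fun f => 3 ^ ((arr.length : Int) - f.1).toNat)).sum

-- The DFS loop of Source B: pop a frame; emit, drop, or push skip then take.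
def pvBLoop (arr : List Int) (target : Int) (stack : List (Int × Int × List Int)) (res : List (List Int)) : List (List Int) :=
  match stack with
  | [] => res
  | (i, s, p) :: rest =>
    if s = target then pvBLoop arr target rest (res ++ [p])
    else if (arr.length : Int) ≤ i then pvBLoop arr target rest res
    else
      match PySem.List.pyGet? arr i with
      | none => pvBLoop arr target rest res
      | some a => pvBLoop arr target ((i + 1, s + a, p ++ [a]) :: (i + 1, s, p) :: rest) res
termination_by pvStackMeasure arr stack
decreasing_by
  · simp [pvStackMeasure]
  · simp [pvStackMeasure]
  · simp [pvStackMeasure]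
  · simp [pvStackMeasure]
    have hk : ((arr.length : Int) - i).toNat = ((arr.length : Int) - (i + 1)).toNat + 1 := by omega
    rw [hk, pow_succ]
    have : 0 < 3 ^ ((arr.length : Int) - (i + 1)).toNat := Nat.pow_pos (by norm_num)
    omega

def sub_sequences_equals_k_alt (idx : Int) (arr : List Int) (path : List Int) (res : List (List Int)) (target : Int) (sum : Int) : List (List Int) :=
  pvBLoop arr target [(idx, sum, path)] res

-- ===== PRECONDITION & SPEC =====
-- Pre_ excludes exactly the inputs on which Python A raises IndexError
-- (idx below -len(arr) with the initial sum ≠ target); B raises there too.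
def Pre_sub_sequences_equals_k (idx : Int) (arr : List Int) (path : List Int) (res : List (List Int)) (target : Int) (sum : Int) : Prop :=
  -(arr.length : Int) ≤ idx ∨ sum = target
instance (idx : Int) (arr : List Int) (path : List Int) (res : List (List Int)) (target : Int) (sum : Int) : Decidable (Pre_sub_sequences_equals_k idx arr path res target sum) := by unfold Pre_sub_sequences_equals_k; infer_instance

def pvWitness_sub_sequences_equals_k : Int × List Int × List Int × List (List Int) × Int × Int := (0, [1, 2, 1], [], [], 2, 0)

def Spec_sub_sequences_equals_k (idx : Int) (arr : List Int) (path : List Int) (res : List (List Int)) (target : Int) (sum : Int) (out : List (List Int)) : Prop := out = sub_sequences_equals_k_alt idx arr path res target sum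
instance (idx : Int) (arr : List Int) (path : List Int) (res : List (List Int)) (target : Int) (sum : Int) (out : List (List Int)) : Decidable (Spec_sub_sequences_equals_k idx arr path res target sum out) := by unfold Spec_sub_sequences_equals_k; infer_instance

-- ===== CLAIM (what is proved, stated in full; the proofs are below) =====
def Claim_equal_sub_sequences_equals_k : Prop := ∀ (idx : Int) (arr : List Int) (path : List Int) (res : List (List Int)) (target : Int) (sum : Int), Dom_sub_sequences_equals_k idx arr path res target sum → Pre_sub_sequences_equals_k idx arr path res target sum → Spec_sub_sequences_equals_k idx arr path res target sum (sub_sequences_equals_k idx arr path res target sum)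

-- ===== LEMMAS AND PROOFS =====

-- Processing one frame of the stack fully equals running A on that frame, then the rest.
theorem pvBLoop_frame (arr : List Int) (target i s : Int) (p : List Int)
    (rest : List (Int × Int × List Int)) (res : List (List Int)) :
    pvBLoop arr target ((i, s, p) :: rest) res
      = pvBLoop arr target rest (sub_sequences_equals_k i arr p res target s) := by
  rw [pvBLoop, sub_sequences_equals_k]
  by_cases hs : s = target
  · simp [hs]
  · simp only [hs, if_false]
    by_cases hi : (arr.length : Int) ≤ i
    · simp [hi]
    · simp only [hi, if_false]
      match h : PySem.List.pyGet? arr i with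
      | none => simp
      | some a =>
        simp only []
        rw [pvBLoop_frame arr target (i + 1) (s + a) (p ++ [a]) ((i + 1, s, p) :: rest) res]
        rw [pvBLoop_frame]
termination_by ((arr.length : Int) - i).toNat
decreasing_by all_goals omega

theorem pvWitness_ok :
    Dom_sub_sequences_equals_k (pvWitness_sub_sequences_equals_k.1) (pvWitness_sub_sequences_equals_k.2.1) (pvWitness_sub_sequences_equals_k.2.2.1) (pvWitness_sub_sequences_equals_k.2.2.2.1) (pvWitness_sub_sequences_equals_k.2.2.2.2.1) (pvWitness_sub_sequences_equals_k.2.2.2.2.2) ∧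
    Pre_sub_sequences_equals_k (pvWitness_sub_sequences_equals_k.1) (pvWitness_sub_sequences_equals_k.2.1) (pvWitness_sub_sequences_equals_k.2.2.1) (pvWitness_sub_sequences_equals_k.2.2.2.1) (pvWitness_sub_sequences_equals_k.2.2.2.2.1) (pvWitness_sub_sequences_equals_k.2.2.2.2.2) := by
  decide

-- ===== VERDICT (by name: the statement is the Claim_ definition above) =====
theorem sub_sequences_equals_k_spec : Claim_equal_sub_sequences_equals_k := by
  intro idx arr path res target sum _ _
  unfold Spec_sub_sequences_equals_k sub_sequences_equals_k_alt
  rw [pvBLoop_frame, pvBLoop]
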